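-- pv_equiv track=rewrite | github.com/rascall-v1/rascallv1 | rascall/analysis.py | get_halocarbons
-- ===== SOURCE A (Python) =====
-- def get_halocarbons(plotables, molecule_dictionary):
--     not_hydrocarbons = 0
--     halocarbons = 0
--     halocarbons_list = []
--     halocarbons_in_NIST = []
--
--     for molecule_code, molecule_functionals in molecule_dictionary.items():
--         if any([e in molecule_code for e in 'OPNS']):
-- #        if any('O' in s for s in molecule_code) or any('P' in s for s in molecule_code) or any('N' in s for s in molecule_code) or any('S' in s for s in molecule_code):
--             not_hydrocarbons = not_hydrocarbons + 1
--         elif any('F' in s for s in molecule_code) or any('I' in s for s in molecule_code) or any('B' in s for s in molecule_code) or any('l' in s for s in molecule_code):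
--             #print (hydrocarbons + 1), molecule_code, ' with ', len(molecule_dictionary.get(molecule_code)), ' functionals'
--             halocarbons_list.append(molecule_code)
--             halocarbons = halocarbons + 1
--             if molecule_code in plotables:
--                 halocarbons_in_NIST.append(molecule_code)
--     print ('Halocarbons:', len(halocarbons_list),'Halocarbons in NIST:', len(halocarbons_in_NIST))
--     return halocarbons_in_NIST, not_hydrocarbons
-- ===== SOURCE B (Python) =====
-- def get_halocarbons(plotables, molecule_dictionary):
--     halocarbons_list = [code for code in molecule_dictionary
--                         if not any(e in code for e in 'OPNS')
--                         and any(e in code for e in 'FIBl')]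
--     halocarbons_in_NIST = [code for code in halocarbons_list if code in plotables]
--     not_hydrocarbons = len([code for code in molecule_dictionary
--                             if any(e in code for e in 'OPNS')])
--     print('Halocarbons:', len(halocarbons_list), 'Halocarbons in NIST:', len(halocarbons_in_NIST))
--     return halocarbons_in_NIST, not_hydrocarbons
-- ===== Notes on version B (the rewrite author's own statement) =====
-- stated objective: simpler
-- what changed: Replaces the single stateful classifying loop (four accumulators, if/elif priority) with three independent comprehension passes: filter keys into halocarbons_list, filter that against plotables, and count keys containing any of 'OPNS'.
import Mathlib
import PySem

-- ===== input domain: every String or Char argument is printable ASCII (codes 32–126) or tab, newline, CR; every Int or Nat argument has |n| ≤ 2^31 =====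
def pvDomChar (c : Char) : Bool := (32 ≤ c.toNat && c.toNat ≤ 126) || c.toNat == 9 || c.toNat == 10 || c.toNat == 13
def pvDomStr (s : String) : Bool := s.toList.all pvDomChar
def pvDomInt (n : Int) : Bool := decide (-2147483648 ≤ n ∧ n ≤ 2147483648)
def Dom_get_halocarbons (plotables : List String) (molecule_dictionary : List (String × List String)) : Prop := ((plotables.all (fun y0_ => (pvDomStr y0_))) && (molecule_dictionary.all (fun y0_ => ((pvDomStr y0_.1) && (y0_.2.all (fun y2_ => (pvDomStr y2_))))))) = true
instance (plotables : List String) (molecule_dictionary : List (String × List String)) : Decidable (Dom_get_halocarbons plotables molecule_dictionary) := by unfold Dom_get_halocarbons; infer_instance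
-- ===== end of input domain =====

-- B re-implements A's single stateful classifying loop as three independent filter passes
-- (objective: simpler). Equivalence is about the RETURN value; both programs also print the
-- same two lengths as a side effect (not modelled here).

-- ===== PORT A =====
-- any([e in molecule_code for e in 'OPNS'])
def pvAnyOPNS (code : String) : Bool :=
  "OPNS".toList.any (fun e => PySem.Chars.isIn [e] code.toList)

-- any('F' in s for s in molecule_code) or … or any('l' in s for s in molecule_code)
def pvElifHalo (code : String) : Bool :=
  code.toList.any (fun s => PySem.Chars.isIn ['F'] [s]) ||
  code.toList.any (fun s => PySem.Chars.isIn ['I'] [s]) ||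
  code.toList.any (fun s => PySem.Chars.isIn ['B'] [s]) ||
  code.toList.any (fun s => PySem.Chars.isIn ['l'] [s])

def get_halocarbons (plotables : List String) (molecule_dictionary : List (String × List String)) : List String × Int :=
  let st := molecule_dictionary.foldl
    (fun (st : Int × Int × List String × List String) p =>
      let (not_hydrocarbons, halocarbons, halocarbons_list, halocarbons_in_NIST) := st
      let molecule_code := p.1
      if pvAnyOPNS molecule_code then
        (not_hydrocarbons + 1, halocarbons, halocarbons_list, halocarbons_in_NIST)
      else if pvElifHalo molecule_code then
        (not_hydrocarbons, halocarbons + 1, halocarbons_list ++ [molecule_code],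
         if plotables.contains molecule_code then halocarbons_in_NIST ++ [molecule_code]
         else halocarbons_in_NIST)
      else st)
    (0, 0, [], [])
  (st.2.2.2, st.1)

-- ===== PORT B =====
-- any(e in code for e in 'FIBl')
def pvAnyFIBl (code : String) : Bool :=
  "FIBl".toList.any (fun e => PySem.Chars.isIn [e] code.toList)

def get_halocarbons_alt (plotables : List String) (molecule_dictionary : List (String × List String)) : List String × Int :=
  let halocarbons_list :=
    (molecule_dictionary.map Prod.fst).filter (fun code => !pvAnyOPNS code && pvAnyFIBl code)
  let halocarbons_in_NIST := halocarbons_list.filter (fun code => plotables.contains code)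
  let not_hydrocarbons : Int :=
    ((molecule_dictionary.map Prod.fst).filter (fun code => pvAnyOPNS code)).length
  (halocarbons_in_NIST, not_hydrocarbons)

-- ===== PRECONDITION & SPEC =====
def Spec_get_halocarbons (plotables : List String) (molecule_dictionary : List (String × List String)) (out : List String × Int) : Prop := out = get_halocarbons_alt plotables molecule_dictionary
instance (plotables : List String) (molecule_dictionary : List (String × List String)) (out : List String × Int) : Decidable (Spec_get_halocarbons plotables molecule_dictionary out) := by unfold Spec_get_halocarbons; infer_instance

-- ===== CLAIM (what is proved, stated in full; the proofs are below) =====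
def Claim_equal_get_halocarbons : Prop := ∀ (plotables : List String) (molecule_dictionary : List (String × List String)), Dom_get_halocarbons plotables molecule_dictionary → Spec_get_halocarbons plotables molecule_dictionary (get_halocarbons plotables molecule_dictionary)

-- ===== LEMMAS AND PROOFS =====

theorem singleton_isIn (e : Char) (cs : List Char) :
    PySem.Chars.isIn [e] cs = cs.contains e := by
  rw [Bool.eq_iff_iff, PySem.Chars.isIn_iff_infix]
  constructor
  · intro h
    have := h.sublist
    simpa using this
  · intro h
    rcases List.mem_iff_append.mp (by simpa using h) with ⟨s, t, rfl⟩
    exact ⟨s, t, by simp⟩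

theorem elif_eq (code : String) : pvElifHalo code = pvAnyFIBl code := by
  rw [Bool.eq_iff_iff]
  simp [pvElifHalo, pvAnyFIBl, singleton_isIn, List.any_eq_true]
  tauto

theorem foldA_spec (plotables : List String) (l : List (String × List String))
    (nh h : Int) (hl hn : List String) :
    l.foldl
      (fun (st : Int × Int × List String × List String) p =>
        let (not_hydrocarbons, halocarbons, halocarbons_list, halocarbons_in_NIST) := st
        let molecule_code := p.1
        if pvAnyOPNS molecule_code then
          (not_hydrocarbons + 1, halocarbons, halocarbons_list, halocarbons_in_NIST)
        else if pvElifHalo molecule_code then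
          (not_hydrocarbons, halocarbons + 1, halocarbons_list ++ [molecule_code],
           if plotables.contains molecule_code then halocarbons_in_NIST ++ [molecule_code]
           else halocarbons_in_NIST)
        else st)
      (nh, h, hl, hn) =
    (nh + ((l.map Prod.fst).filter (fun code => pvAnyOPNS code)).length,
     h + (((l.map Prod.fst).filter (fun code => !pvAnyOPNS code && pvAnyFIBl code)).length : Int),
     hl ++ (l.map Prod.fst).filter (fun code => !pvAnyOPNS code && pvAnyFIBl code),
     hn ++ ((l.map Prod.fst).filter (fun code => !pvAnyOPNS code && pvAnyFIBl code)).filter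
            (fun code => plotables.contains code)) := by
  induction l generalizing nh h hl hn with
  | nil => simp
  | cons p rest ih =>
    rw [List.foldl_cons, ih]
    by_cases hO : pvAnyOPNS p.1
    · simp only [hO, if_true, List.map_cons, List.filter_cons, Bool.not_true,
        Bool.false_and, List.length_cons, Prod.mk.injEq]
      refine ⟨by push_cast; ring, rfl, rfl, rfl⟩
    · by_cases hF : pvAnyFIBl p.1
      · have hE : pvElifHalo p.1 = true := by rw [elif_eq]; exact hF
        by_cases hP : plotables.contains p.1
        · simp only [hO, hE, hP, if_true, Bool.not_false, hF, Bool.true_and,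
            List.map_cons, List.filter_cons, List.length_cons, Prod.mk.injEq, if_neg hO]
          refine ⟨rfl, by push_cast; ring, by simp, by simp⟩
        · simp only [hO, hE, hP, if_true, Bool.not_false, hF, Bool.true_and,
            List.map_cons, List.filter_cons, List.length_cons, Prod.mk.injEq, if_neg hO]
          refine ⟨rfl, by push_cast; ring, by simp, by simp⟩
      · have hE : pvElifHalo p.1 = false := by rw [elif_eq]; simpa using hF
        simp [hO, hE, hF]

-- ===== VERDICT (by name: the statement is the Claim_ definition above) =====
theorem get_halocarbons_spec : Claim_equal_get_halocarbons := by
  intro plotables md _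
  unfold Spec_get_halocarbons get_halocarbons get_halocarbons_alt
  simp only [foldA_spec]
  simp
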